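-- pv_equiv track=rewrite | github.com/VenkataJanga/cv_builder_automation | src/ai/services/deep_validator.py | _find_duplicates
-- ===== SOURCE A (Python) =====
-- from typing import Dict, List, Any, Optional, Set
--
-- def _find_duplicates(items: List[str]) -> Set[str]:
--     """Find duplicate items in list"""
--     seen = set()
--     duplicates = set()
--     for item in items:
--         item_lower = item.lower().strip()
--         if item_lower in seen:
--             duplicates.add(item)
--         seen.add(item_lower)
--     return duplicates
-- ===== SOURCE B (Python) =====
-- def _find_duplicates(items):
--     """Find duplicate items in list"""
--     first = {}
--     for i, item in enumerate(items):
--         first.setdefault(item.lower().strip(), i)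
--     return {item for i, item in enumerate(items)
--             if first[item.lower().strip()] != i}
-- ===== Notes on version B (the rewrite author's own statement) =====
-- stated objective: alternative
-- what changed: A's single pass with a running 'seen' set is replaced by two passes: a dict mapping each normalized key to its first-occurrence index, then a set comprehension keeping every item whose index is not that first index.
import Mathlib
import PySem

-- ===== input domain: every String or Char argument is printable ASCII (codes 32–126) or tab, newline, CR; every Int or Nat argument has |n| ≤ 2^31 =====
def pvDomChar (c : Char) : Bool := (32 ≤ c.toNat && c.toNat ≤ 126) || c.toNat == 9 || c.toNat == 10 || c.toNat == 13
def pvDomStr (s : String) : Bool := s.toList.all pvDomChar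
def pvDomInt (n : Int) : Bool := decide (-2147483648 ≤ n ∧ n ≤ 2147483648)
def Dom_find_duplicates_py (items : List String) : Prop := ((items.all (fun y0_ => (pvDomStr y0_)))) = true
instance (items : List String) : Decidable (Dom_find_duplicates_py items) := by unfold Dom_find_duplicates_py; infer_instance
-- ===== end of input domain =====

-- B replaces A's running "seen" set by a two-pass scheme: a dict of first-occurrence
-- indices per normalized key, then a set of the items whose index is not that first
-- index (objective: alternative decomposition; same set, same insertion order).


-- item.lower().strip(), shared normalization of both Pythons
def pvNorm (s : String) : String := PySem.Str.strip (PySem.Str.lower s)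

-- ===== PORT A =====
-- one pass; state = (seen normalized keys, duplicates) as Python sets
def find_duplicates_py (items : List String) : List String :=
  (items.foldl
    (fun (st : PySem.Set String × PySem.Set String) (item : String) =>
      let il := pvNorm item
      (PySem.Set.add st.1 il,
       if PySem.Set.contains st.1 il then PySem.Set.add st.2 item else st.2))
    (PySem.Set.empty, PySem.Set.empty)).2

-- ===== PORT B =====
-- first pass of Source B: dict normalized key -> index of its first occurrence
def pvFirst (items : List String) : PySem.Dict String Int :=
  (PySem.List.enumerate items).foldl
    (fun (d : PySem.Dict String Int) (p : Int × String) =>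
      PySem.Dict.setdefault d (pvNorm p.2) p.1) PySem.Dict.empty

-- second pass: the set comprehension. Python's first[k] always hits here (the key was
-- inserted in the first pass), so getD's default (-1) is never used — see pvFirst_get?.
def find_duplicates_py_alt (items : List String) : List String :=
  let first := pvFirst items
  (PySem.List.enumerate items).foldl
    (fun (s : PySem.Set String) (p : Int × String) =>
      if PySem.Dict.getD first (pvNorm p.2) (-1) ≠ p.1 then PySem.Set.add s p.2 else s)
    PySem.Set.empty

-- ===== PRECONDITION & SPEC =====
def Spec_find_duplicates_py (items : List String) (out : List String) : Prop := out = find_duplicates_py_alt items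
instance (items : List String) (out : List String) : Decidable (Spec_find_duplicates_py items out) := by unfold Spec_find_duplicates_py; infer_instance

-- ===== CLAIM (what is proved, stated in full; the proofs are below) =====
def Claim_equal_find_duplicates_py : Prop := ∀ (items : List String), Dom_find_duplicates_py items → Spec_find_duplicates_py items (find_duplicates_py items)

-- ===== LEMMAS AND PROOFS =====

-- a head that is not the key shifts the first-occurrence index by one
theorem index_shift (s : Int) (k x : String) (xs : List String) (hne : pvNorm x ≠ k) :
    Option.map (fun j => s + (j : Int)) (PySem.List.index? ((x::xs).map pvNorm) k) =
    Option.map (fun j => (s+1) + (j : Int)) (PySem.List.index? (xs.map pvNorm) k) := by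
  rw [List.map_cons]
  rw [show PySem.List.index? (pvNorm x :: xs.map pvNorm) k = (PySem.List.index? (xs.map pvNorm) k).map (·+1) from ?_]
  · cases PySem.List.index? (xs.map pvNorm) k <;> simp; omega
  · simp [PySem.List.index?_eq_idxOf?, List.idxOf?, List.findIdx?_cons, hne]

-- the first-pass fold: a present key keeps its value; a new key gets offset + first index
theorem pvFirst_get?_aux (l : List String) (s : Int) (d : PySem.Dict String Int) (k : String) :
    ((PySem.List.enumerate l s).foldl
        (fun (d : PySem.Dict String Int) (p : Int × String) =>
          PySem.Dict.setdefault d (pvNorm p.2) p.1) d).get? k =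
      match d.get? k with
      | some v => some v
      | none => (PySem.List.index? (l.map pvNorm) k).map (fun j => s + (j : Int)) := by
  induction l generalizing s d with
  | nil => simp [PySem.List.enumerate]; cases d.get? k <;> simp
  | cons x xs ih =>
    rw [PySem.List.enumerate_cons, List.foldl_cons, ih]
    by_cases hc : d.contains (pvNorm x)
    · have hd : PySem.Dict.setdefault d (pvNorm x) s = d := by
        simp [PySem.Dict.setdefault, hc]
      rw [hd]
      rcases hg : d.get? k with _ | v
      · have hcf : d.contains k = false := (PySem.Dict.get?_eq_none_iff_contains d k).1 hg
        have hne : pvNorm x ≠ k := fun h => by rw [h] at hc; simp [hcf] at hc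
        simp only [hg]
        exact (index_shift s k x xs hne).symm
      · simp [hg]
    · have hd : PySem.Dict.setdefault d (pvNorm x) s = PySem.Dict.mk (d.items ++ [(pvNorm x, s)]) := by
        simp [PySem.Dict.setdefault, hc]
      rw [hd]
      rcases hg : d.get? k with _ | v
      · have hfind : List.find? (fun p => p.1 == k) d.items = none := by
          simpa [PySem.Dict.get?] using hg
        by_cases hk : pvNorm x = k
        · have : (PySem.Dict.mk (d.items ++ [(pvNorm x, s)])).get? k = some s := by
            simp [PySem.Dict.get?, List.find?_append, hfind, hk]
          rw [this]
          simp [hk, List.idxOf?, List.findIdx?_cons]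
        · have : (PySem.Dict.mk (d.items ++ [(pvNorm x, s)])).get? k = none := by
            simp [PySem.Dict.get?, List.find?_append, hfind, hk]
          rw [this]
          simp only [hg]
          exact (index_shift s k x xs hk).symm
      · rcases hf : List.find? (fun p => p.1 == k) d.items with _ | pr
        · simp [PySem.Dict.get?, hf] at hg
        · have h2 : (PySem.Dict.mk (d.items ++ [(pvNorm x, s)])).get? k = some pr.2 := by
            simp [PySem.Dict.get?, List.find?_append, hf]
          have h3 : pr.2 = v := by simpa [PySem.Dict.get?, hf] using hg
          rw [h2, h3]



theorem pvFirst_get? (items : List String) (k : String) :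
    (pvFirst items).get? k = (PySem.List.index? (items.map pvNorm) k).map (fun j => (j : Int)) := by
  have h := pvFirst_get?_aux items 0 PySem.Dict.empty k
  simpa [pvFirst, PySem.Dict.get?, PySem.Dict.empty] using h

-- first index j of k in a list that also carries k at position i: j != i iff k occurs before i
theorem index?_ne_iff_mem_take (ns : List String) (k : String) (i j : Nat)
    (hi : i < ns.length) (hk : ns[i] = k) (hj : PySem.List.index? ns k = some j) :
    (j ≠ i) ↔ k ∈ ns.take i := by
  rw [PySem.List.index?_eq_some_iff] at hj
  obtain ⟨pre, suf, hdecomp, hlen, hnot⟩ := hj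
  have hpre : ∀ m (hm : m < ns.length), m < j → ns[m] ∈ pre := by
    intro m hm hmj
    subst hdecomp
    rw [List.getElem_append_left (by omega)]
    exact List.getElem_mem _
  have hle : j ≤ i := by
    by_contra h
    exact hnot (hk ▸ hpre i hi (by omega))
  have hjv : ns[j]'(by subst hdecomp; simp; omega) = k := by
    subst hdecomp hlen
    rw [List.getElem_append_right (le_refl _)]
    simp
  constructor
  · intro hne
    exact List.mem_take_iff_getElem.mpr ⟨j, (by omega : j < min i ns.length), hjv⟩
  · intro hmem hne
    subst hne
    obtain ⟨m, hm, hv⟩ := List.mem_take_iff_getElem.mp hmem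
    exact hnot (hv ▸ hpre m (by omega) (by omega))

-- the two loops agree from any aligned position on
theorem pvLoop (items : List String) (suffix : List String) (i : Nat) (dups : PySem.Set String)
    (hdrop : items.drop i = suffix) :
    (suffix.foldl
        (fun (st : PySem.Set String × PySem.Set String) (item : String) =>
          let il := pvNorm item
          (PySem.Set.add st.1 il,
           if PySem.Set.contains st.1 il then PySem.Set.add st.2 item else st.2))
        (PySem.Set.ofList ((items.take i).map pvNorm), dups)).2 =
      (PySem.List.enumerate suffix (i : Int)).foldl
        (fun (s : PySem.Set String) (p : Int × String) =>
          if PySem.Dict.getD (pvFirst items) (pvNorm p.2) (-1) ≠ p.1 then PySem.Set.add s p.2 else s)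
        dups := by
  induction suffix generalizing i dups with
  | nil => simp [PySem.List.enumerate]
  | cons x rest ih =>
    have hlt : i < items.length := by
      by_contra h
      rw [List.drop_eq_nil_iff.mpr (by omega)] at hdrop
      exact List.cons_ne_nil x rest hdrop.symm
    have hcd := List.getElem_cons_drop hlt
    rw [hdrop] at hcd
    have hxi : items[i] = x := (List.cons_eq_cons.mp hcd.symm).1.symm
    have hrest : items.drop (i+1) = rest := (List.cons_eq_cons.mp hcd.symm).2.symm
    -- first-occurrence index of pvNorm x
    have hmem : pvNorm x ∈ items.map pvNorm := by
      have : (items.map pvNorm)[i]'(by simpa using hlt) = pvNorm x := by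
        simp [hxi]
      exact this ▸ List.getElem_mem _
    obtain ⟨j, hj⟩ := Option.isSome_iff_exists.mp ((PySem.List.index?_isSome_iff _ _).mpr hmem)
    have hgetD : PySem.Dict.getD (pvFirst items) (pvNorm x) (-1) = (j : Int) := by
      rw [PySem.Dict.getD_eq_get?_getD, pvFirst_get?, hj]
      rfl
    have hiff : (j ≠ i) ↔ pvNorm x ∈ (items.take i).map pvNorm := by
      have h := index?_ne_iff_mem_take (items.map pvNorm) (pvNorm x) i j
        (by simpa using hlt) (by simp [hxi]) hj
      rwa [← List.map_take] at h
    -- one step of each loop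
    rw [List.foldl_cons, PySem.List.enumerate_cons, List.foldl_cons]
    have hseen : PySem.Set.add (PySem.Set.ofList ((items.take i).map pvNorm)) (pvNorm x)
        = PySem.Set.ofList ((items.take (i+1)).map pvNorm) := by
      rw [List.take_add_one, List.getElem?_eq_getElem hlt]
      simp [hxi, PySem.Set.ofList_append_singleton]
    have hcast : (i : Int) + 1 = ((i + 1 : Nat) : Int) := by push_cast; ring
    by_cases hmt : pvNorm x ∈ (items.take i).map pvNorm
    · have hca : PySem.Set.contains (PySem.Set.ofList ((items.take i).map pvNorm)) (pvNorm x) = true :=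
        (PySem.Set.contains_iff _ _).mpr ((PySem.Set.mem_ofList _ _).mpr hmt)
      have hcb : PySem.Dict.getD (pvFirst items) (pvNorm x) (-1) ≠ (i : Int) := by
        rw [hgetD]
        exact_mod_cast fun h => (hiff.mpr hmt) (by exact_mod_cast h)
      simp only [hca, if_true, if_pos hcb, hseen, hcast]
      exact ih (i+1) _ hrest
    · have hca : PySem.Set.contains (PySem.Set.ofList ((items.take i).map pvNorm)) (pvNorm x) = false := by
        rw [← Bool.not_eq_true]
        intro h
        exact hmt ((PySem.Set.mem_ofList _ _).mp ((PySem.Set.contains_iff _ _).mp h))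
      have hje : j = i := by
        by_contra h
        exact hmt (hiff.mp h)
      have hcb : ¬ (PySem.Dict.getD (pvFirst items) (pvNorm x) (-1) ≠ (i : Int)) := by
        rw [hgetD, hje]
        simp
      simp only [hca, Bool.false_eq_true, if_false, if_neg hcb, hseen, hcast]
      exact ih (i+1) _ hrest

-- ===== VERDICT (by name: the statement is the Claim_ definition above) =====
theorem find_duplicates_py_spec : Claim_equal_find_duplicates_py := by
  intro items _
  show find_duplicates_py items = find_duplicates_py_alt items
  have h := pvLoop items items 0 PySem.Set.empty (by simp)
  simpa [find_duplicates_py, find_duplicates_py_alt] using h
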